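-- pv_equiv track=rewrite | github.com/jbirby/POCSAG-Pager-Codec | scripts/pocsag_common.py | decode_alpha_message
-- ===== SOURCE A (Python) =====
-- def decode_alpha_message(data_chunks):
--     """
--     Decode alphanumeric message from 20-bit chunks.
--
--     Args:
--         data_chunks: List of 20-bit values
--
--     Returns:
--         Decoded string
--     """
--     # Extract bits from chunks
--     bits = []
--     for chunk in data_chunks:
--         for i in range(19, -1, -1):
--             bits.append((chunk >> i) & 1)
--
--     # Group into 7-bit characters (LSB first)
--     result = []
--     for i in range(0, len(bits) - 6, 7):
--         char_bits = bits[i:i+7]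
--         # Convert from LSB-first to ASCII
--         ascii_val = 0
--         for j, bit in enumerate(char_bits):
--             ascii_val |= (bit << j)
--
--         char = chr(ascii_val & 0x7F)
--         if char.isprintable() or char == ' ':
--             result.append(char)
--
--     return ''.join(result).rstrip('\x00')
-- ===== SOURCE B (Python) =====
-- def decode_alpha_message(data_chunks):
--     """
--     Decode alphanumeric message from 20-bit chunks.
--
--     Single streaming pass: an integer accumulator collects bits LSB-first and a
--     character is emitted each time 7 bits are complete; the trailing partial
--     group is dropped automatically.  Only printable characters are kept, so the
--     joined string can never contain '\x00' and no final rstrip is needed.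
--     """
--     result = []
--     acc = 0
--     count = 0
--     for chunk in data_chunks:
--         for i in range(19, -1, -1):
--             acc |= ((chunk >> i) & 1) << count
--             count += 1
--             if count == 7:
--                 char = chr(acc & 0x7F)
--                 if char.isprintable() or char == ' ':
--                     result.append(char)
--                 acc = 0
--                 count = 0
--     return ''.join(result)
-- ===== Notes on version B (the rewrite author's own statement) =====
-- stated objective: simpler
-- what changed: Replaces A's two-phase decode (materialise the full bit list, then re-slice it into 7-bit windows and re-fold each) with a single streaming pass keeping an integer accumulator and bit counter that emits a character whenever 7 bits are complete; the trailing partial group drops out automatically and the dead rstrip('\x00') (only printable characters are ever appended) is removed.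
import Mathlib
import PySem

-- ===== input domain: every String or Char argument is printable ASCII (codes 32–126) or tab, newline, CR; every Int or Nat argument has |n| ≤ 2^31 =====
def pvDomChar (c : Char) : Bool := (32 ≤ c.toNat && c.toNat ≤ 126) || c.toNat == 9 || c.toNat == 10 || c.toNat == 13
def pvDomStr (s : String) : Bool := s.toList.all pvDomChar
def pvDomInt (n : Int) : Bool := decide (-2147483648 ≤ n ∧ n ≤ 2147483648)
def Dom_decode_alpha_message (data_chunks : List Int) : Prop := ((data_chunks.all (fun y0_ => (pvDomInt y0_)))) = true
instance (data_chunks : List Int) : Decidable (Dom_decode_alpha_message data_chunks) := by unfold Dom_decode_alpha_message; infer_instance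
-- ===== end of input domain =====

-- B replaces A's two-phase decode (materialise the whole bit list, then re-slice it into
-- 7-bit groups) by one streaming pass with a bit accumulator and counter; the final
-- rstrip('\x00') is dropped because only printable characters are ever appended.

-- `(chunk >> i) & 1` for i = 19..0 — the same expression occurs in both Pythons
-- (i ≥ 0 there, so `chunk >> i` is exactly `chunk >>> i.toNat`)
def bitOf (chunk i : Int) : Int := PySem.Int.band (chunk >>> i.toNat) 1

-- `char.isprintable() or char == ' '` — the same test occurs in both Pythons; exact for the
-- codes 0–127 that chr(v & 0x7F) yields (printable ASCII is exactly codes 32–126, ' ' is 32)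
def pyKeepChar (c : Char) : Bool := (32 ≤ c.toNat && c.toNat ≤ 126) || c == ' '

-- ===== PORT A =====
-- the body of A's grouping loop over index i, with `bits` the full bit list
def groupStepA (bits : List Int) (result : List Char) (i : Int) : List Char :=
  let char_bits := PySem.List.slice bits (some i) (some (i + 7))
  let ascii_val : Int := (PySem.List.enumerate char_bits).foldl
    (fun a jb => PySem.Int.bor a (jb.2 <<< jb.1.toNat)) 0
  let char : Char := Char.ofNat (PySem.Int.band ascii_val 127).toNat
  if pyKeepChar char then result ++ [char] else result

def decode_alpha_message (data_chunks : List Int) : String :=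
  -- extract bits from chunks
  let bits : List Int := data_chunks.foldl (fun bits chunk =>
    (PySem.List.pyRange 19 (-1) (-1)).foldl (fun bits i => bits ++ [bitOf chunk i]) bits) []
  -- group into 7-bit characters (LSB first)
  let result : List Char :=
    (PySem.List.pyRange 0 ((bits.length : Int) - 6) 7).foldl (groupStepA bits) []
  -- ''.join(result).rstrip('\x00') — hand port, exact: rstrip(cs) drops exactly the trailing characters of cs
  String.ofList ((result.reverse.dropWhile (fun c => c == '\x00')).reverse)

-- ===== PORT B =====
-- the body of B's inner loop for one incoming bit b, on state (result, acc, count)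
def bstepB (st : List Char × Int × Int) (b : Int) : List Char × Int × Int :=
  let acc := PySem.Int.bor st.2.1 (b <<< st.2.2.toNat)
  let count := st.2.2 + 1
  if count == 7 then
    let char : Char := Char.ofNat (PySem.Int.band acc 127).toNat
    (if pyKeepChar char then st.1 ++ [char] else st.1, 0, 0)
  else (st.1, acc, count)

def decode_alpha_message_alt (data_chunks : List Int) : String :=
  let st : List Char × Int × Int := data_chunks.foldl (fun st chunk =>
    (PySem.List.pyRange 19 (-1) (-1)).foldl (fun st i => bstepB st (bitOf chunk i)) st)
    ([], 0, 0)
  String.ofList st.1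

-- ===== PRECONDITION & SPEC =====
def Spec_decode_alpha_message (data_chunks : List Int) (out : String) : Prop := out = decode_alpha_message_alt data_chunks
instance (data_chunks : List Int) (out : String) : Decidable (Spec_decode_alpha_message data_chunks out) := by unfold Spec_decode_alpha_message; infer_instance

-- ===== CLAIM (what is proved, stated in full; the proofs are below) =====
def Claim_equal_decode_alpha_message : Prop := ∀ (data_chunks : List Int), Dom_decode_alpha_message data_chunks → Spec_decode_alpha_message data_chunks (decode_alpha_message data_chunks)

-- ===== LEMMAS AND PROOFS =====

-- the 20 bits of one chunk, MSB first
def chunkBits (c : Int) : List Int :=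
  (PySem.List.pyRange 19 (-1) (-1)).map (bitOf c)

-- the 7-bit value of one complete group, first bit = LSB (the shape both loop bodies reduce to)
def emitVal (b0 b1 b2 b3 b4 b5 b6 : Int) : Int :=
  PySem.Int.bor (PySem.Int.bor (PySem.Int.bor (PySem.Int.bor (PySem.Int.bor
    (PySem.Int.bor (PySem.Int.bor 0 b0) (b1 <<< (1:Nat))) (b2 <<< (2:Nat))) (b3 <<< (3:Nat)))
    (b4 <<< (4:Nat))) (b5 <<< (5:Nat))) (b6 <<< (6:Nat))

def emitChar (b0 b1 b2 b3 b4 b5 b6 : Int) : Char :=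
  Char.ofNat (PySem.Int.band (emitVal b0 b1 b2 b3 b4 b5 b6) 127).toNat

-- the character (if kept) of one complete 7-bit group
def emit7 (b0 b1 b2 b3 b4 b5 b6 : Int) : List Char :=
  if pyKeepChar (emitChar b0 b1 b2 b3 b4 b5 b6) then [emitChar b0 b1 b2 b3 b4 b5 b6] else []

-- reference decoding of a bit stream: one character per complete 7-bit group, tail dropped
def decodeGroups : List Int → List Char
  | b0::b1::b2::b3::b4::b5::b6::rest => emit7 b0 b1 b2 b3 b4 b5 b6 ++ decodeGroups rest
  | _ => []

lemma short_len {t : List Int}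
    (h : ∀ (b0 b1 b2 b3 b4 b5 b6 : Int) (rest : List Int),
      t = b0::b1::b2::b3::b4::b5::b6::rest → False) : t.length ≤ 6 := by
  match t, h with
  | [], _ => simp
  | [a], _ => simp
  | [a,b], _ => simp
  | [a,b,c], _ => simp
  | [a,b,c,d], _ => simp
  | [a,b,c,d,e], _ => simp
  | [a,b,c,d,e,f], _ => simp
  | b0::b1::b2::b3::b4::b5::b6::rest, h => exact (h b0 b1 b2 b3 b4 b5 b6 rest rfl).elim

lemma decodeGroups_short {t : List Int}
    (h : ∀ (b0 b1 b2 b3 b4 b5 b6 : Int) (rest : List Int),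
      t = b0::b1::b2::b3::b4::b5::b6::rest → False) : decodeGroups t = [] := by
  match t, h with
  | [], _ => rfl
  | [a], _ => rfl
  | [a,b], _ => rfl
  | [a,b,c], _ => rfl
  | [a,b,c,d], _ => rfl
  | [a,b,c,d,e], _ => rfl
  | [a,b,c,d,e,f], _ => rfl
  | b0::b1::b2::b3::b4::b5::b6::rest, h => exact (h b0 b1 b2 b3 b4 b5 b6 rest rfl).elim

lemma pyRange_cons7 (a b : Int) (h : a < b) :
    PySem.List.pyRange a b 7 = a :: PySem.List.pyRange (a + 7) b 7 := by
  rw [PySem.List.pyRange_of_pos a b (s := 7) (by norm_num),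
      PySem.List.pyRange_of_pos (a + 7) b (s := 7) (by norm_num)]
  by_cases h2 : a + 7 < b
  · have : ((b - a + 7 - 1) / 7).toNat = ((b - (a + 7) + 7 - 1) / 7).toNat + 1 := by omega
    simp only [if_pos h, if_pos h2, this, List.range_succ_eq_map, List.map_cons, List.map_map]
    congr 1
    · ring
    · apply List.map_congr_left; intro k _; simp [Function.comp]; ring
  · have : ((b - a + 7 - 1) / 7).toNat = 1 := by omega
    simp [h, h2, this, List.range_succ]

lemma pyRange_nil7 (a b : Int) (h : ¬ a < b) : PySem.List.pyRange a b 7 = [] := by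
  rw [PySem.List.pyRange_of_pos a b (s := 7) (by norm_num)]; simp [h]

-- A's bit-extraction phase produces exactly the concatenated chunk bits
lemma bitsA_eq (data_chunks : List Int) :
    data_chunks.foldl (fun bits chunk =>
      (PySem.List.pyRange 19 (-1) (-1)).foldl (fun bits i => bits ++ [bitOf chunk i]) bits) [] =
    data_chunks.flatMap chunkBits := by
  have h : (fun (bits : List Int) (chunk : Int) =>
      (PySem.List.pyRange 19 (-1) (-1)).foldl (fun bits i => bits ++ [bitOf chunk i]) bits) =
      fun bits chunk => bits ++ chunkBits chunk := by
    funext bits chunk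
    rw [PySem.List.foldl_append_singleton_eq_map]; rfl
  rw [h, PySem.List.foldl_append_eq_flatMap, List.nil_append]

-- B's double loop is the bit-step fold over the same concatenated bit stream
lemma foldB_eq (data_chunks : List Int) (st : List Char × Int × Int) :
    data_chunks.foldl (fun st chunk =>
      (PySem.List.pyRange 19 (-1) (-1)).foldl (fun st i => bstepB st (bitOf chunk i)) st) st =
    (data_chunks.flatMap chunkBits).foldl bstepB st := by
  rw [List.foldl_flatMap]
  apply PySem.List.foldl_congr_mem
  intro acc chunk _
  rw [chunkBits, List.foldl_map]

-- streaming from an empty accumulator emits exactly the complete 7-bit groups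
lemma foldB_decode (bs : List Int) : ∀ (res : List Char),
    (bs.foldl bstepB (res, (0 : Int), (0 : Int))).1 = res ++ decodeGroups bs := by
  induction bs using decodeGroups.induct with
  | case1 b0 b1 b2 b3 b4 b5 b6 rest ih =>
      intro res
      simp only [List.foldl]
      simp [bstepB]
      rw [decodeGroups]
      split_ifs with h <;> rw [ih] <;> simp [emit7, emitChar, emitVal, h]
  | case2 t h =>
      intro res
      rw [decodeGroups_short h]
      match t, h with
      | [], _ => simp [List.foldl]
      | [a], _ => simp [List.foldl, bstepB]
      | [a,b], _ => simp [List.foldl, bstepB]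
      | [a,b,c], _ => simp [List.foldl, bstepB]
      | [a,b,c,d], _ => simp [List.foldl, bstepB]
      | [a,b,c,d,e], _ => simp [List.foldl, bstepB]
      | [a,b,c,d,e,f], _ => simp [List.foldl, bstepB]
      | b0::b1::b2::b3::b4::b5::b6::rest, h => exact (h b0 b1 b2 b3 b4 b5 b6 rest rfl).elim

lemma slice_at (pre bs : List Int) (h : 7 ≤ bs.length) :
    PySem.List.slice (pre ++ bs) (some (pre.length : Int)) (some ((pre.length : Int) + 7)) =
      bs.take 7 := by
  have hlen : (pre ++ bs).length = pre.length + bs.length := List.length_append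
  simp only [PySem.List.slice, PySem.List.clampIdx, hlen]
  have h1 : ¬ ((pre.length : Int) < 0) := by omega
  have h2 : ¬ ((pre.length : Int) + 7 < 0) := by omega
  simp only [if_neg h1, if_neg h2]
  have e1 : min (pre.length : Int).toNat (pre.length + bs.length) = pre.length := by omega
  have e2 : min ((pre.length : Int) + 7).toNat (pre.length + bs.length) = pre.length + 7 := by
    omega
  rw [e1, e2]
  have e3 : pre.length + 7 - pre.length = 7 := by omega
  rw [e3, List.drop_left]

-- A's grouping loop over any suffix of the bit list decodes that suffix's complete groups
lemma foldA_decode (bs : List Int) : ∀ (pre : List Int) (res : List Char),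
    (PySem.List.pyRange (pre.length : Int) ((pre.length : Int) + (bs.length : Int) - 6) 7).foldl
      (groupStepA (pre ++ bs)) res = res ++ decodeGroups bs := by
  induction bs using decodeGroups.induct with
  | case1 b0 b1 b2 b3 b4 b5 b6 rest ih =>
      intro pre res
      have hlt : (pre.length : Int) <
          (pre.length : Int) + ((b0::b1::b2::b3::b4::b5::b6::rest).length : Int) - 6 := by
        simp only [List.length_cons]; push_cast; omega
      rw [pyRange_cons7 _ _ hlt, List.foldl_cons]
      have hsl : groupStepA (pre ++ (b0::b1::b2::b3::b4::b5::b6::rest)) res (pre.length : Int) =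
          res ++ emit7 b0 b1 b2 b3 b4 b5 b6 := by
        unfold groupStepA
        rw [slice_at _ _ (by simp)]
        simp only [List.take]
        simp [PySem.List.enumerate_cons, PySem.List.enumerate_nil, List.foldl]
        split_ifs with h <;> simp [emit7, emitChar, emitVal, h]
      rw [hsl]
      have hpre : pre ++ (b0::b1::b2::b3::b4::b5::b6::rest) =
          (pre ++ [b0,b1,b2,b3,b4,b5,b6]) ++ rest := by simp
      have ha : (pre.length : Int) + 7 = (((pre ++ [b0,b1,b2,b3,b4,b5,b6]).length : Int)) := by
        simp
      have hb : (pre.length : Int) + ((b0::b1::b2::b3::b4::b5::b6::rest).length : Int) - 6 =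
          ((pre ++ [b0,b1,b2,b3,b4,b5,b6]).length : Int) + (rest.length : Int) - 6 := by
        simp only [List.length_cons, List.length_append, List.length_nil]; push_cast; ring
      rw [hpre, ha, hb, ih]
      rw [decodeGroups]
      simp
  | case2 t h =>
      intro pre res
      have hlen := short_len h
      have hno : ¬ ((pre.length : Int) < (pre.length : Int) + (t.length : Int) - 6) := by omega
      rw [pyRange_nil7 _ _ hno, List.foldl_nil, decodeGroups_short h, List.append_nil]

-- every decoded character is kept by the printable filter, so none is '\x00'
lemma decodeGroups_no_nul (bs : List Int) : ∀ c ∈ decodeGroups bs, (c == '\x00') = false := by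
  induction bs using decodeGroups.induct with
  | case1 b0 b1 b2 b3 b4 b5 b6 rest ih =>
      intro c hc
      rw [decodeGroups, List.mem_append] at hc
      rcases hc with hc | hc
      · unfold emit7 at hc
        split at hc
        · rename_i hkeep
          simp only [List.mem_singleton] at hc
          subst hc
          simp only [pyKeepChar, Bool.or_eq_true, Bool.and_eq_true, decide_eq_true_eq,
            beq_iff_eq] at hkeep
          rcases hkeep with ⟨h1, _⟩ | h1
          · simp only [beq_eq_false_iff_ne, ne_eq]
            intro he; rw [he] at h1; simp at h1
          · rw [h1]; decide
        · simp at hc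
      · exact ih c hc
  | case2 t h =>
      rw [decodeGroups_short h]
      intro c hc
      simp at hc

-- ===== VERDICT (by name: the statement is the Claim_ definition above) =====
theorem decode_alpha_message_spec : Claim_equal_decode_alpha_message := by
  intro data_chunks _
  unfold Spec_decode_alpha_message
  simp only [decode_alpha_message, decode_alpha_message_alt]
  rw [bitsA_eq, foldB_eq]
  have hA := foldA_decode (data_chunks.flatMap chunkBits) [] []
  simp only [List.length_nil, List.nil_append, Int.natCast_zero, zero_add] at hA
  rw [hA, foldB_decode _ []]
  have hstrip : ∀ (l : List Char), (∀ c ∈ l, (c == '\x00') = false) →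
      (l.reverse.dropWhile (fun c => c == '\x00')).reverse = l := by
    intro l hl
    rw [List.dropWhile_eq_self_iff.mpr, List.reverse_reverse]
    intro hpos
    have hmem : l.reverse[0] ∈ l := List.mem_reverse.mp (List.getElem_mem hpos)
    have h2 := hl _ hmem
    simp only [beq_eq_false_iff_ne, ne_eq] at h2
    simpa using h2
  rw [hstrip _ (decodeGroups_no_nul _), List.nil_append]
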